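-- pv_equiv track=rewrite | github.com/alexsotocx/algorithms | online_judges/Topcoder/Python/LotteryTicket.py | buy
-- ===== SOURCE A (Python) =====
-- def buy(price, b1, b2, b3, b4):
--   p = [b1, b2, b3, b4]
--   for i in range((1<<4)):
--     total = 0
--     for j in range(4):
--       total += p[j] if (i & (1<<j)) != 0  else 0
--     if total == price:
--       return 'POSSIBLE'
--   return 'IMPOSSIBLE'
-- ===== SOURCE B (Python) =====
-- def buy(price, b1, b2, b3, b4):
--     sums = {0}
--     for b in (b1, b2, b3, b4):
--         sums |= {s + b for s in sums}
--     return 'POSSIBLE' if price in sums else 'IMPOSSIBLE'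
-- ===== Notes on version B (the rewrite author's own statement) =====
-- stated objective: alternative
-- what changed: Replaces the 2^4 bitmask enumeration with per-mask resumming by an incremental subset-sum set: start from {0}, fold each bill in by unioning shifted sums, then test membership of price.
import Mathlib
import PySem

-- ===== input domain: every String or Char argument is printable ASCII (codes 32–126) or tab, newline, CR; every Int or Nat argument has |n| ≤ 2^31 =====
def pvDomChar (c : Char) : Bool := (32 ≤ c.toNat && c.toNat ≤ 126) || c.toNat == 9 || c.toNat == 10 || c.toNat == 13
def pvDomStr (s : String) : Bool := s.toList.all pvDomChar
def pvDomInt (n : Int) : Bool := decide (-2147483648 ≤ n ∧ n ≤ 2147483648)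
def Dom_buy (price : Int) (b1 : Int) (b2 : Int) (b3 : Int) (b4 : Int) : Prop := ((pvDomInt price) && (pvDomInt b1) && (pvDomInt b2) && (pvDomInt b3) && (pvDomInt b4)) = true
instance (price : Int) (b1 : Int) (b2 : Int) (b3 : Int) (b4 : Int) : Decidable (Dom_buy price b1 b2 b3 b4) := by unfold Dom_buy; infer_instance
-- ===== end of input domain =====

-- B replaces A's 16-mask enumeration (resumming each subset) by an incremental
-- subset-sum set accumulation over the four bills; same result, alternative algorithm.

-- ===== PORT A =====
-- inner loop: total += p[j] if (i & (1<<j)) != 0 else 0, for j in range(4)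
-- (j ∈ pyRange 0 4 1 is nonnegative, so j.toNat in the shift is exact)
def buyTotal (p : List Int) (i : Int) : Int :=
  (PySem.List.pyRange 0 4 1).foldl
    (fun total j =>
      total + (if Int.land i ((1 : Int) <<< j.toNat) ≠ 0 then PySem.List.pyGetD p j 0 else 0)) 0

-- outer loop with early return 'POSSIBLE'
def buyLoop (price : Int) (p : List Int) : List Int → String
  | [] => "IMPOSSIBLE"
  | i :: rest => if buyTotal p i = price then "POSSIBLE" else buyLoop price p rest

def buy (price : Int) (b1 : Int) (b2 : Int) (b3 : Int) (b4 : Int) : String :=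
  buyLoop price [b1, b2, b3, b4] (PySem.List.pyRange 0 ((1 : Int) <<< 4) 1)

-- ===== PORT B =====
def buy_alt (price : Int) (b1 : Int) (b2 : Int) (b3 : Int) (b4 : Int) : String :=
  let sums := [b1, b2, b3, b4].foldl
    (fun s b => PySem.Set.union s (PySem.Set.ofList (s.map (fun x => x + b))))
    (PySem.Set.ofList [0])
  if PySem.Set.contains sums price then "POSSIBLE" else "IMPOSSIBLE"

-- ===== PRECONDITION & SPEC =====
def Spec_buy (price : Int) (b1 : Int) (b2 : Int) (b3 : Int) (b4 : Int) (out : String) : Prop := out = buy_alt price b1 b2 b3 b4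
instance (price : Int) (b1 : Int) (b2 : Int) (b3 : Int) (b4 : Int) (out : String) : Decidable (Spec_buy price b1 b2 b3 b4 out) := by unfold Spec_buy; infer_instance

-- ===== CLAIM (what is proved, stated in full; the proofs are below) =====
def Claim_equal_buy : Prop := ∀ (price : Int) (b1 : Int) (b2 : Int) (b3 : Int) (b4 : Int), Dom_buy price b1 b2 b3 b4 → Spec_buy price b1 b2 b3 b4 (buy price b1 b2 b3 b4)

-- ===== LEMMAS AND PROOFS =====

theorem buyLoop_eq_any (price : Int) (p : List Int) (masks : List Int) :
    buyLoop price p masks =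
      if ∃ i ∈ masks, buyTotal p i = price then "POSSIBLE" else "IMPOSSIBLE" := by
  induction masks with
  | nil => simp [buyLoop]
  | cons i rest ih =>
      by_cases h : buyTotal p i = price
      · simp [buyLoop, h]
      · simp [buyLoop, h, ih]

theorem buyTotal_eq (b1 b2 b3 b4 i : Int) :
    buyTotal [b1, b2, b3, b4] i =
      (if Int.land i 1 = 0 then 0 else b1) + (if Int.land i 2 = 0 then 0 else b2) +
      (if Int.land i 4 = 0 then 0 else b3) + (if Int.land i 8 = 0 then 0 else b4) := by
  unfold buyTotal
  rw [show PySem.List.pyRange 0 4 1 = [0, 1, 2, 3] from by decide]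
  norm_num [List.foldl, PySem.List.pyGetD, PySem.List.pyIdx?, PySem.List.pyGet?,
    show ((1:Int) <<< 0) = 1 from by decide, show ((1:Int) <<< 1) = 2 from by decide, show ((1:Int) <<< 2) = 4 from by decide, show ((1:Int) <<< 3) = 8 from by decide,
    show Int.toNat 2 = 2 from rfl, show Int.toNat 3 = 3 from rfl]

-- ===== VERDICT (by name: the statement is the Claim_ definition above) =====
theorem buy_spec : Claim_equal_buy := by
  intro price b1 b2 b3 b4 _
  unfold Spec_buy buy buy_alt
  rw [show PySem.List.pyRange 0 ((1 : Int) <<< 4) 1 =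
        [0,1,2,3,4,5,6,7,8,9,10,11,12,13,14,15] from by decide]
  rw [buyLoop_eq_any]
  have hmem :
      (PySem.Set.contains
        ([b1, b2, b3, b4].foldl
          (fun s b => PySem.Set.union s (PySem.Set.ofList (s.map (fun x => x + b))))
          (PySem.Set.ofList [0])) price = true)
      ↔ (∃ i ∈ ([0,1,2,3,4,5,6,7,8,9,10,11,12,13,14,15] : List Int),
            buyTotal [b1, b2, b3, b4] i = price) := by
    simp only [List.foldl, PySem.Set.contains_iff, PySem.Set.mem_union,
      PySem.Set.mem_ofList, List.mem_map]
    norm_num [buyTotal_eq, or_and_right, exists_or, exists_eq_left, exists_eq_left']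
    norm_num [show Int.land 0 1 = 0 from by decide,
      show Int.land 0 2 = 0 from by decide,
      show Int.land 0 4 = 0 from by decide,
      show Int.land 0 8 = 0 from by decide,
      show Int.land 1 1 = 1 from by decide,
      show Int.land 1 2 = 0 from by decide,
      show Int.land 1 4 = 0 from by decide,
      show Int.land 1 8 = 0 from by decide,
      show Int.land 2 1 = 0 from by decide,
      show Int.land 2 2 = 2 from by decide,
      show Int.land 2 4 = 0 from by decide,
      show Int.land 2 8 = 0 from by decide,
      show Int.land 3 1 = 1 from by decide,
      show Int.land 3 2 = 2 from by decide,
      show Int.land 3 4 = 0 from by decide,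
      show Int.land 3 8 = 0 from by decide,
      show Int.land 4 1 = 0 from by decide,
      show Int.land 4 2 = 0 from by decide,
      show Int.land 4 4 = 4 from by decide,
      show Int.land 4 8 = 0 from by decide,
      show Int.land 5 1 = 1 from by decide,
      show Int.land 5 2 = 0 from by decide,
      show Int.land 5 4 = 4 from by decide,
      show Int.land 5 8 = 0 from by decide,
      show Int.land 6 1 = 0 from by decide,
      show Int.land 6 2 = 2 from by decide,
      show Int.land 6 4 = 4 from by decide,
      show Int.land 6 8 = 0 from by decide,
      show Int.land 7 1 = 1 from by decide,
      show Int.land 7 2 = 2 from by decide,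
      show Int.land 7 4 = 4 from by decide,
      show Int.land 7 8 = 0 from by decide,
      show Int.land 8 1 = 0 from by decide,
      show Int.land 8 2 = 0 from by decide,
      show Int.land 8 4 = 0 from by decide,
      show Int.land 8 8 = 8 from by decide,
      show Int.land 9 1 = 1 from by decide,
      show Int.land 9 2 = 0 from by decide,
      show Int.land 9 4 = 0 from by decide,
      show Int.land 9 8 = 8 from by decide,
      show Int.land 10 1 = 0 from by decide,
      show Int.land 10 2 = 2 from by decide,
      show Int.land 10 4 = 0 from by decide,
      show Int.land 10 8 = 8 from by decide,
      show Int.land 11 1 = 1 from by decide,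
      show Int.land 11 2 = 2 from by decide,
      show Int.land 11 4 = 0 from by decide,
      show Int.land 11 8 = 8 from by decide,
      show Int.land 12 1 = 0 from by decide,
      show Int.land 12 2 = 0 from by decide,
      show Int.land 12 4 = 4 from by decide,
      show Int.land 12 8 = 8 from by decide,
      show Int.land 13 1 = 1 from by decide,
      show Int.land 13 2 = 0 from by decide,
      show Int.land 13 4 = 4 from by decide,
      show Int.land 13 8 = 8 from by decide,
      show Int.land 14 1 = 0 from by decide,
      show Int.land 14 2 = 2 from by decide,
      show Int.land 14 4 = 4 from by decide,
      show Int.land 14 8 = 8 from by decide,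
      show Int.land 15 1 = 1 from by decide,
      show Int.land 15 2 = 2 from by decide,
      show Int.land 15 4 = 4 from by decide,
      show Int.land 15 8 = 8 from by decide]
    rw [eq_comm (a := price) (b := 0)]
    tauto
  by_cases h : ∃ i ∈ ([0,1,2,3,4,5,6,7,8,9,10,11,12,13,14,15] : List Int),
      buyTotal [b1, b2, b3, b4] i = price
  · rw [if_pos h]
    simp only [hmem.mpr h]
    rfl
  · rw [if_neg h]
    have hc : (PySem.Set.contains
        ([b1, b2, b3, b4].foldl
          (fun s b => PySem.Set.union s (PySem.Set.ofList (s.map (fun x => x + b))))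
          (PySem.Set.ofList [0])) price) = false := by
      rcases hb : (PySem.Set.contains
        ([b1, b2, b3, b4].foldl
          (fun s b => PySem.Set.union s (PySem.Set.ofList (s.map (fun x => x + b))))
          (PySem.Set.ofList [0])) price) with _ | _
      · rfl
      · exact absurd (hmem.mp hb) h
    simp only [hc]
    rfl
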